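-- pv_equiv track=rewrite | github.com/regev-lab/PyIGV | src/pyigv/alignment.py | block_indices
-- ===== SOURCE A (Python) =====
-- def block_indices(edits):
--     if not edits:
--         return
--
--     start = 0
--     current_type = edits[0]
--
--     for i, t in enumerate(edits):
--         if t != current_type:
--             # Yield the current block [start, i) and its type.
--             yield start, i, current_type
--             # Reset the block.
--             start = i
--             current_type = t
--         # Yield the final block.
--     yield start, len(edits), current_type
-- ===== SOURCE B (Python) =====
-- def block_indices(edits):
--     # Two-pointer run scan: for each run start i, advance j to the run's end,
--     # yield the run, and jump i to j. No sentinel "current_type" state.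
--     i = 0
--     n = len(edits)
--     while i < n:
--         j = i
--         while j < n and edits[j] == edits[i]:
--             j += 1
--         yield i, j, edits[i]
--         i = j
-- ===== Notes on version B (the rewrite author's own statement) =====
-- stated objective: idiomatic
-- what changed: Replaced the sentinel current_type transition-detection loop over enumerate with a two-pointer run scan that finds each run's end directly and jumps the start pointer past it.
import Mathlib
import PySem

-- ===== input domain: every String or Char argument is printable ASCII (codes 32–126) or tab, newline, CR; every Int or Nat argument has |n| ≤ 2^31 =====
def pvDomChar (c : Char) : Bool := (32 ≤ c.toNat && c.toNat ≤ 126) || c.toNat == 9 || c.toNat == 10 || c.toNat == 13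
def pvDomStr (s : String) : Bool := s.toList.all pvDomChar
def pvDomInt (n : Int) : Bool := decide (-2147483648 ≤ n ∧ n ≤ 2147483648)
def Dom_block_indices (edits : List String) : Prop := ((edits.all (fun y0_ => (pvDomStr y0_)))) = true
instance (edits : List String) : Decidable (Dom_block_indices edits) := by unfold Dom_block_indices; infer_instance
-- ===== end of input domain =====

-- B replaces A's sentinel current_type transition-detection loop with a two-pointer run scan (idiomatic; same cost).

-- ===== PORT A =====
-- enumerate(edits) starting at n (A uses n = 0)
def pvEnumFrom (n : Nat) : List String → List (Nat × String)
  | [] => []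
  | x :: t => (n, x) :: pvEnumFrom (n + 1) t

-- one step of A's for-loop: state = (yielded so far, start, current_type)
def pvStepA (st : List (Int × Int × String) × Int × String) (p : Nat × String) :
    List (Int × Int × String) × Int × String :=
  if p.2 ≠ st.2.2 then (st.1 ++ [(st.2.1, (p.1 : Int), st.2.2)], (p.1 : Int), p.2)
  else st

-- the final `yield start, len(edits), current_type`
def pvFinish (st : List (Int × Int × String) × Int × String) (n : Nat) :
    List (Int × Int × String) :=
  st.1 ++ [(st.2.1, (n : Int), st.2.2)]

def block_indices (edits : List String) : List (Int × Int × String) :=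
  match edits with
  | [] => []
  | e0 :: _ =>
    pvFinish ((pvEnumFrom 0 edits).foldl pvStepA ([], (0 : Int), e0)) edits.length

-- ===== PORT B =====
-- length of the inner while loop's advance: how many leading elements equal x
def pvRunLen (x : String) : List String → Nat
  | [] => 0
  | y :: t => if y = x then 1 + pvRunLen x t else 0

theorem pvRunLen_le (x : String) (t : List String) : pvRunLen x t ≤ t.length := by
  induction t with
  | nil => simp [pvRunLen]
  | cons y s ih => simp only [pvRunLen, List.length_cons]; split <;> omega

-- the outer while loop: i is the current run's start index
def pvGoB (i : Nat) : List String → List (Int × Int × String)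
  | [] => []
  | x :: t =>
    let k := pvRunLen x t
    ((i : Int), ((i + 1 + k : Nat) : Int), x) :: pvGoB (i + 1 + k) (t.drop k)
termination_by l => l.length
decreasing_by
  simp only [List.length_drop, List.length_cons]
  have := pvRunLen_le x t
  omega

def block_indices_alt (edits : List String) : List (Int × Int × String) :=
  pvGoB 0 edits

-- ===== PRECONDITION & SPEC =====
def Spec_block_indices (edits : List String) (out : List (Int × Int × String)) : Prop := out = block_indices_alt edits
instance (edits : List String) (out : List (Int × Int × String)) : Decidable (Spec_block_indices edits out) := by unfold Spec_block_indices; infer_instance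

-- ===== CLAIM (what is proved, stated in full; the proofs are below) =====
def Claim_equal_block_indices : Prop := ∀ (edits : List String), Dom_block_indices edits → Spec_block_indices edits (block_indices edits)

-- ===== LEMMAS AND PROOFS =====

theorem pvGoB_nil (i : Nat) : pvGoB i [] = [] := by rw [pvGoB]

theorem pvGoB_cons (i : Nat) (x : String) (t : List String) :
    pvGoB i (x :: t)
      = ((i : Int), ((i + 1 + pvRunLen x t : Nat) : Int), x)
          :: pvGoB (i + 1 + pvRunLen x t) (t.drop (pvRunLen x t)) := by
  rw [pvGoB]

-- reference run decomposition: the blocks yielded from state (start, cur) at offset off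
def pvBlocks (start : Int) (cur : String) (off : Nat) : List String → List (Int × Int × String)
  | [] => [(start, (off : Int), cur)]
  | x :: t =>
    if x = cur then pvBlocks start cur (off + 1) t
    else (start, (off : Int), cur) :: pvBlocks ((off : Int)) x (off + 1) t

theorem pvFoldA_eq_blocks (l : List String) : ∀ (off : Nat) (acc : List (Int × Int × String))
    (start : Int) (cur : String),
    pvFinish ((pvEnumFrom off l).foldl pvStepA (acc, start, cur)) (off + l.length)
      = acc ++ pvBlocks start cur off l := by
  induction l with
  | nil => intro off acc start cur; simp [pvEnumFrom, pvBlocks, pvFinish]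
  | cons x t ih =>
    intro off acc start cur
    simp only [pvEnumFrom, List.foldl_cons, pvBlocks, List.length_cons]
    by_cases hx : x = cur
    · have hstep : pvStepA (acc, start, cur) (off, x) = (acc, start, cur) := by
        simp [pvStepA, hx]
      rw [hstep]
      have := ih (off + 1) acc start cur
      rw [if_pos hx]
      rw [show off + (t.length + 1) = (off + 1) + t.length by omega]
      exact this
    · have hstep : pvStepA (acc, start, cur) (off, x)
          = (acc ++ [(start, (off : Int), cur)], (off : Int), x) := by
        simp [pvStepA, hx]
      rw [hstep]
      have := ih (off + 1) (acc ++ [(start, (off : Int), cur)]) (off : Int) x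
      rw [if_neg hx]
      rw [show off + (t.length + 1) = (off + 1) + t.length by omega]
      rw [this]
      simp

theorem pvBlocks_eq_goB (t : List String) : ∀ (start : Int) (cur : String) (off : Nat),
    pvBlocks start cur off t
      = (start, ((off + pvRunLen cur t : Nat) : Int), cur)
          :: pvGoB (off + pvRunLen cur t) (t.drop (pvRunLen cur t)) := by
  induction t with
  | nil => intro start cur off; simp [pvBlocks, pvRunLen, pvGoB_nil]
  | cons x t ih =>
    intro start cur off
    by_cases hx : x = cur
    · subst hx
      simp only [pvBlocks, pvRunLen, if_true]
      rw [ih start x (off + 1)]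
      rw [Nat.add_comm 1 (pvRunLen x t), List.drop_succ_cons]
      simp [Nat.add_comm, Nat.add_left_comm]
    · simp only [pvBlocks, if_neg hx, pvRunLen]
      rw [ih (off : Int) x (off + 1)]
      simp only [Nat.add_zero, List.drop_zero]
      rw [pvGoB_cons]

-- ===== VERDICT (by name: the statement is the Claim_ definition above) =====
theorem block_indices_spec : Claim_equal_block_indices := by
  intro edits _
  unfold Spec_block_indices block_indices_alt
  match edits with
  | [] => simp [block_indices, pvGoB_nil]
  | e0 :: t =>
    show pvFinish ((pvEnumFrom 0 (e0 :: t)).foldl pvStepA ([], (0 : Int), e0)) (e0 :: t).length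
      = pvGoB 0 (e0 :: t)
    have hA := pvFoldA_eq_blocks (e0 :: t) 0 [] 0 e0
    simp only [Nat.zero_add, List.nil_append] at hA
    rw [hA]
    simp only [pvBlocks]
    rw [pvBlocks_eq_goB t 0 e0 1, pvGoB_cons]
    norm_num
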